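-- pv_equiv track=rewrite | github.com/Yuvraj2172/myleetcode | 2551-apply-operations-to-an-array/2551-apply-operations-to-an-array.py | applyOperations
-- ===== SOURCE A (Python) =====
-- from typing import List
--
-- def applyOperations(nums: List[int]) -> List[int]:
--     for i in range(len(nums) - 1):
--         if nums[i] == nums[i+1]:
--             nums[i] = nums[i] * 2
--             nums[i+1] = 0
--
--     a,b = [],[]
--     for i in range(len(nums)):
--         if nums[i] == 0:
--             a.append(nums[i])
--         else:
--             b.append(nums[i])
--
--     res= []
--
--     for i in b:
--         res.append(i)
--     for i in a:
--         res.append(i)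
--
--     return res
-- ===== SOURCE B (Python) =====
-- def applyOperations(nums):
--     for i in range(len(nums) - 1):
--         if nums[i] == nums[i+1]:
--             nums[i] = nums[i] * 2
--             nums[i+1] = 0
--     return sorted(nums, key=lambda x: x == 0)
-- ===== Notes on version B (the rewrite author's own statement) =====
-- stated objective: simpler
-- what changed: keeps A's in-place adjacent-merge pass but replaces A's partition-into-two-lists-and-concatenate section with a single stable sort on the boolean key x == 0, which pushes zeros to the end while preserving the order of non-zeros
import Mathlib
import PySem

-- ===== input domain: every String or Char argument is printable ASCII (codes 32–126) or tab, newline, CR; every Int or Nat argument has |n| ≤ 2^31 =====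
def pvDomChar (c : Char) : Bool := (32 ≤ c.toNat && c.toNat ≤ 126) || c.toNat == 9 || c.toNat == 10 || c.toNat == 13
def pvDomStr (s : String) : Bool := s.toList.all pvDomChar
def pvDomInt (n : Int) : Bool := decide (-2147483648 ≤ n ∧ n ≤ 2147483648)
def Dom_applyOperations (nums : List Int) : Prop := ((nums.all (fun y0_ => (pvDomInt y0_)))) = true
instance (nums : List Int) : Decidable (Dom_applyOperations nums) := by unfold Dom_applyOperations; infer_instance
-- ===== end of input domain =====

-- B keeps A's in-place merge pass but replaces the partition-and-concatenate
-- section with one stable sort on the boolean key x == 0 (simpler).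
-- Note: both A and B mutate the argument in place during the merge pass
-- (identically); the equivalence proved here is about the return value.

-- ===== PORT A =====
-- the in-place adjacent-merge loop 'for i in range(len(nums)-1): …', as the
-- structural recursion over the same evolving list state (nums[i], nums[i+1])
def pvMerge : List Int → List Int
  | x :: y :: rest =>
      if x = y then (x * 2) :: pvMerge (0 :: rest) else x :: pvMerge (y :: rest)
  | l => l
termination_by l => l.length

def applyOperations (nums : List Int) : List Int :=
  let merged := pvMerge nums
  let ab := merged.foldl
    (fun (p : List Int × List Int) x =>
      if x = 0 then (p.1 ++ [x], p.2) else (p.1, p.2 ++ [x])) ([], [])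
  let res := ab.2.foldl (fun r i => r ++ [i]) []
  let res := ab.1.foldl (fun r i => r ++ [i]) res
  res

-- ===== PORT B =====
def applyOperations_alt (nums : List Int) : List Int :=
  PySem.List.sorted (pvMerge nums) (fun x => decide (x = 0)) false

-- ===== PRECONDITION & SPEC =====
def Spec_applyOperations (nums : List Int) (out : List Int) : Prop := out = applyOperations_alt nums
instance (nums : List Int) (out : List Int) : Decidable (Spec_applyOperations nums out) := by unfold Spec_applyOperations; infer_instance

-- ===== CLAIM (what is proved, stated in full; the proofs are below) =====
def Claim_equal_applyOperations : Prop := ∀ (nums : List Int), Dom_applyOperations nums → Spec_applyOperations nums (applyOperations nums)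

-- ===== LEMMAS AND PROOFS =====
-- ===== VERDICT (by name: the statement is the Claim_ definition above) =====
-- insertBy skips a prefix none of whose elements x goes before
lemma insertBy_append_not_before (bef : Int → Int → Bool) (x : Int)
    (N Z : List Int) (h : ∀ n ∈ N, bef x n = false) :
    PySem.List.insertBy bef x (N ++ Z) = N ++ PySem.List.insertBy bef x Z := by
  induction N with
  | nil => simp
  | cons n N ih =>
      simp only [List.cons_append, PySem.List.insertBy, h n (by simp)]
      simp only [Bool.false_eq_true, if_false, List.cons.injEq, true_and]
      exact ih (fun m hm => h m (by simp [hm]))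

-- insertBy puts x first when x goes before every element
lemma insertBy_all_before (bef : Int → Int → Bool) (x : Int)
    (Z : List Int) (h : ∀ z ∈ Z, bef x z = true) :
    PySem.List.insertBy bef x Z = x :: Z := by
  cases Z with
  | nil => rfl
  | cons z Z => simp [PySem.List.insertBy, h z (by simp)]

-- invariant of the insertion-sort fold with the boolean key (x == 0):
-- the accumulator stays 'non-zeros so far ++ zeros so far'
lemma sorted_fold_partition (l N Z : List Int)
    (hN : ∀ n ∈ N, n ≠ 0) (hZ : ∀ z ∈ Z, z = 0) :
    l.foldl (fun acc x =>
        PySem.List.insertBy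
          (fun a b => decide ((decide (a = 0) : Bool) < (decide (b = 0) : Bool)))
          x acc) (N ++ Z)
      = (N ++ l.filter (fun x => !decide (x = 0)))
        ++ (Z ++ l.filter (fun x => decide (x = 0))) := by
  induction l generalizing N Z with
  | nil => simp
  | cons x l ih =>
      by_cases hx : x = 0
      · have hstep :
            PySem.List.insertBy
              (fun a b => decide ((decide (a = 0) : Bool) < (decide (b = 0) : Bool)))
              x (N ++ Z) = (N ++ Z) ++ [x] := by
          apply PySem.List.insertBy_of_forall_not_before
          intro y _; simp [hx]
        simp only [List.foldl_cons, hstep]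
        rw [List.append_assoc N Z [x]]
        rw [ih N (Z ++ [x]) hN (by intro z hz; rcases List.mem_append.mp hz with h|h
                                   · exact hZ z h
                                   · simp_all)]
        simp [hx]
      · have hstep :
            PySem.List.insertBy
              (fun a b => decide ((decide (a = 0) : Bool) < (decide (b = 0) : Bool)))
              x (N ++ Z) = (N ++ [x]) ++ Z := by
          rw [insertBy_append_not_before _ _ N Z
              (by intro n hn; simp [hx, hN n hn])]
          rw [insertBy_all_before _ _ Z (by intro z hz; simp [hx, hZ z hz])]
          simp
        simp only [List.foldl_cons, hstep]
        rw [ih (N ++ [x]) Z (by intro n hn; rcases List.mem_append.mp hn with h|h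
                                · exact hN n h
                                · simp_all) hZ]
        simp [hx]

-- A's partition fold builds (zeros, non-zeros) as filters
lemma partition_fold (l A B : List Int) :
    l.foldl (fun (p : List Int × List Int) x =>
        if x = 0 then (p.1 ++ [x], p.2) else (p.1, p.2 ++ [x])) (A, B)
      = (A ++ l.filter (fun x => decide (x = 0)),
         B ++ l.filter (fun x => !decide (x = 0))) := by
  induction l generalizing A B with
  | nil => simp
  | cons x l ih =>
      by_cases hx : x = 0 <;> simp [List.foldl_cons, hx, ih]

-- ===== VERDICT (by name: the statement is the Claim_ definition above) =====
theorem applyOperations_spec : Claim_equal_applyOperations := by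
  intro nums _
  show applyOperations nums = applyOperations_alt nums
  have h := sorted_fold_partition (pvMerge nums) [] [] (by simp) (by simp)
  simp only [List.nil_append] at h
  simp only [applyOperations, applyOperations_alt,
    PySem.List.sorted_eq_foldl_insertBy, h, partition_fold,
    List.nil_append, PySem.List.foldl_append_singleton]
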